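-- pv_equiv track=rewrite | github.com/co-re-study/co-re-study | 53/N포커/윤성운.py | solution
-- ===== SOURCE A (Python) =====
-- def solution(n, width):
--     if n < 4:
--         return 0
--     if n == 4:
--         return width
--     acc = 0
--     cnt = 1
--     while n >= 4:
--         n -= 4
--         if not n:
--             acc += comb(width, cnt)
--         else:
--             acc += comb(width, cnt) * (comb((width - cnt) * 4, n) - solution(n, width - cnt))
--         cnt += 1
--     return acc % 10007
--
-- def comb(n, r):
--     num = 1
--     for i in range(r):
--         num *= (n - i)
--     for i in range(1, r + 1):
--         num //= i
--     return num
-- ===== SOURCE B (Python) =====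
-- def solution(n, width):
--     if n < 4:
--         return 0
--     if n == 4:
--         return width
--     # Bottom-up DP over the chain of states (n-4k, width-k), k = n//4 .. 0.
--     f = []  # f[j] holds the value of state k0+1+j while processing state k0
--     k = n // 4
--     while k >= 0:
--         m = n - 4 * k
--         w = width - k
--         if m < 4:
--             v = 0
--         elif m == 4:
--             v = w
--         else:
--             acc = 0
--             for c in range(1, m // 4 + 1):
--                 r = m - 4 * c
--                 if r == 0:
--                     acc += comb(w, c)
--                 else:
--                     acc += comb(w, c) * (comb((w - c) * 4, r) - f[c - 1])
--             v = acc % 10007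
--         f.insert(0, v)
--         k -= 1
--     return f[0]
--
--
-- def comb(n, r):
--     num = 1
--     for i in range(r):
--         num *= (n - i)
--     for i in range(1, r + 1):
--         num //= i
--     return num
-- ===== Notes on version B (the rewrite author's own statement) =====
-- stated objective: faster
-- what changed: A's exponential recursion over ranks is replaced by a bottom-up dynamic program over the one-dimensional chain of reachable states (n-4k, width-k), so each state is computed once from a table instead of recomputed exponentially often; the small comb helper is kept as is.
import Mathlib
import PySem

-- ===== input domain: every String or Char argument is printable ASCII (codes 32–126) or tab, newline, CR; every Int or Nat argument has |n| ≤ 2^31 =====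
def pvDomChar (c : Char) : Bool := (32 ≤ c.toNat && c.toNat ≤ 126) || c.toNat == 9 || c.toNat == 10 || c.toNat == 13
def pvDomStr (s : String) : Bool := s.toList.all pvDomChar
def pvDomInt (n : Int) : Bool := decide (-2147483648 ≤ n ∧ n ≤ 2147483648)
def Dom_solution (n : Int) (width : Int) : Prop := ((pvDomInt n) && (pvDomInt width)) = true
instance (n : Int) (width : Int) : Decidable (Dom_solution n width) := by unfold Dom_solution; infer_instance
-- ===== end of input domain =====

-- B replaces A's exponential recursion by a bottom-up DP over the chain of states (n-4k, width-k): asymptotically faster.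


-- ===== PORT A =====
-- comb(n, r): num = prod_{i<r}(n-i); then num //= i for i = 1..r (Python floor division)
def comb (n r : Int) : Int :=
  let num := (PySem.List.pyRange 0 r 1).foldl (fun num i => num * (n - i)) 1
  (PySem.List.pyRange 1 (r + 1) 1).foldl (fun num i => PySem.Int.floordiv num i) num

mutual
-- literal port of A: while-loop as solutionLoop over the same state (n, width, acc, cnt)
def solution (n : Int) (width : Int) : Int :=
  if n < 4 then 0
  else if n = 4 then width
  else PySem.Int.mod (solutionLoop n width 0 1) 10007
termination_by (n.toNat, 1)
decreasing_by exact Prod.Lex.right _ (by omega)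

def solutionLoop (n width acc cnt : Int) : Int :=
  if h : 4 ≤ n then
    let n' := n - 4
    let acc' := if n' = 0 then acc + comb width cnt
      else acc + comb width cnt * (comb ((width - cnt) * 4) n' - solution n' (width - cnt))
    solutionLoop n' width acc' (cnt + 1)
  else acc
termination_by (n.toNat, 0)
decreasing_by
  · exact Prod.Lex.left _ _ (by omega)
  · exact Prod.Lex.left _ _ (by omega)
end

-- ===== PORT B =====
def comb_alt (n r : Int) : Int :=
  let num := (PySem.List.pyRange 0 r 1).foldl (fun num i => num * (n - i)) 1
  (PySem.List.pyRange 1 (r + 1) 1).foldl (fun num i => PySem.Int.floordiv num i) num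

-- inner for-loop of Source B at state (m, w) with table suffix f; f[c-1] is always in
-- range when the invariant below holds, so the .getD 0 default is unreachable
def innerStep (m w : Int) (f : List Int) (acc c : Int) : Int :=
  let r := m - 4 * c
  if r = 0 then acc + comb_alt w c
  else acc + comb_alt w c * (comb_alt ((w - c) * 4) r - (PySem.List.pyGet? f (c - 1)).getD 0)

def innerB (m w : Int) (f : List Int) : Int :=
  (PySem.List.pyRange 1 (PySem.Int.floordiv m 4 + 1) 1).foldl (innerStep m w f) 0

def stepB (n width k : Int) (f : List Int) : Int :=
  let m := n - 4 * k
  let w := width - k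
  if m < 4 then 0
  else if m = 4 then w
  else PySem.Int.mod (innerB m w f) 10007

-- while k >= 0: compute state k from f, prepend (f.insert(0, v)), k -= 1
def buildB (n width : Int) (k : Int) (f : List Int) : List Int :=
  if h : 0 ≤ k then buildB n width (k - 1) (stepB n width k f :: f) else f
termination_by (k + 1).toNat
decreasing_by omega

def solution_alt (n : Int) (width : Int) : Int :=
  if n < 4 then 0
  else if n = 4 then width
  else (PySem.List.pyGet? (buildB n width (PySem.Int.floordiv n 4) []) 0).getD 0

-- ===== PRECONDITION & SPEC =====
def Spec_solution (n : Int) (width : Int) (out : Int) : Prop := out = solution_alt n width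
instance (n : Int) (width : Int) (out : Int) : Decidable (Spec_solution n width out) := by unfold Spec_solution; infer_instance

-- ===== CLAIM (what is proved, stated in full; the proofs are below) =====
def Claim_equal_solution : Prop := ∀ (n : Int) (width : Int), Dom_solution n width → Spec_solution n width (solution n width)

-- ===== LEMMAS AND PROOFS =====

theorem comb_alt_eq : comb_alt = comb := rfl

-- A's while-loop equals B's inner fold, provided f's entries hold the recursive values
theorem loop_eq_fold : ∀ (N : Nat) (n w acc cnt m : Int) (f : List Int),
    n.toNat ≤ N → 1 ≤ cnt → m = n + 4 * (cnt - 1) →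
    (∀ c : Int, cnt ≤ c → 1 ≤ m - 4 * c →
      (PySem.List.pyGet? f (c - 1)).getD 0 = solution (m - 4 * c) (w - c)) →
    solutionLoop n w acc cnt =
      (PySem.List.pyRange cnt (PySem.Int.floordiv m 4 + 1) 1).foldl (innerStep m w f) acc := by
  intro N
  induction N with
  | zero =>
    intro n w acc cnt m f hN hcnt hm hf
    rw [solutionLoop, dif_neg (by omega)]
    rw [PySem.Int.floordiv_eq_ediv_of_pos (by norm_num : (0:Int) < 4),
      PySem.List.pyRange_one_eq_nil (by omega)]
    rfl
  | succ N ih =>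
    intro n w acc cnt m f hN hcnt hm hf
    by_cases h4 : 4 ≤ n
    · rw [solutionLoop, dif_pos h4]
      rw [PySem.Int.floordiv_eq_ediv_of_pos (by norm_num : (0:Int) < 4),
        PySem.List.pyRange_one_cons (by omega : cnt < m / 4 + 1), List.foldl_cons]
      have hstep : innerStep m w f acc cnt =
          (if n - 4 = 0 then acc + comb w cnt
           else acc + comb w cnt * (comb ((w - cnt) * 4) (n - 4) - solution (n - 4) (w - cnt))) := by
        simp only [innerStep, comb_alt_eq]
        have hr : m - 4 * cnt = n - 4 := by omega
        rw [hr]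
        by_cases hz : n - 4 = 0
        · simp [hz]
        · rw [if_neg hz, if_neg hz]
          have := hf cnt le_rfl (by omega)
          rw [hr] at this
          rw [this]
      have hrec := ih (n - 4) w
        (if n - 4 = 0 then acc + comb w cnt
         else acc + comb w cnt * (comb ((w - cnt) * 4) (n - 4) - solution (n - 4) (w - cnt)))
        (cnt + 1) m f (by omega) (by omega) (by omega)
        (fun c hc hr => hf c (by omega) hr)
      rw [PySem.Int.floordiv_eq_ediv_of_pos (by norm_num : (0:Int) < 4)] at hrec
      simp only []
      rw [hrec, hstep]
    · rw [solutionLoop, dif_neg h4]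
      rw [PySem.Int.floordiv_eq_ediv_of_pos (by norm_num : (0:Int) < 4),
        PySem.List.pyRange_one_eq_nil (by omega)]
      rfl

-- each DP cell equals A's recursive value
theorem step_eq : ∀ (n width k : Int) (f : List Int),
    (∀ c : Int, 1 ≤ c → 1 ≤ (n - 4 * k) - 4 * c →
      (PySem.List.pyGet? f (c - 1)).getD 0 = solution ((n - 4 * k) - 4 * c) ((width - k) - c)) →
    stepB n width k f = solution (n - 4 * k) (width - k) := by
  intro n width k f hf
  simp only [stepB]
  by_cases h1 : n - 4 * k < 4
  · rw [if_pos h1, solution, if_pos h1]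
  by_cases h2 : n - 4 * k = 4
  · rw [if_neg h1, if_pos h2, solution, if_neg h1, if_pos h2]
  · rw [if_neg h1, if_neg h2, solution, if_neg h1, if_neg h2]
    congr 1
    have := loop_eq_fold (n - 4 * k).toNat (n - 4 * k) (width - k) 0 1 (n - 4 * k) f
      le_rfl le_rfl (by ring) (fun c hc hr => hf c hc hr)
    rw [innerB, this]

-- table invariant through the build loop
theorem build_inv : ∀ (N : Nat) (n width k : Int) (f : List Int),
    (k + 1).toNat ≤ N → -1 ≤ k → k ≤ PySem.Int.floordiv n 4 →
    ((f.length : Int) = PySem.Int.floordiv n 4 - k) →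
    (∀ j : Nat, j < f.length →
      (PySem.List.pyGet? f (j : Int)).getD 0 = solution (n - 4 * ((k + 1) + j)) (width - ((k + 1) + j))) →
    (buildB n width k f).length = f.length + (k + 1).toNat ∧
    ∀ j : Nat, j < (buildB n width k f).length →
      (PySem.List.pyGet? (buildB n width k f) (j : Int)).getD 0 = solution (n - 4 * j) (width - j) := by
  intro N
  induction N with
  | zero =>
    intro n width k f hN h1 h2 hlen hf
    have hk : k = -1 := by omega
    rw [buildB, dif_neg (by omega)]
    subst hk
    refine ⟨by simp, fun j hj => ?_⟩
    have := hf j hj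
    have he : (-1 + 1 + (j : Int)) = (j : Int) := by omega
    rw [he] at this
    exact this
  | succ N ih =>
    intro n width k f hN h1 h2 hlen hf
    by_cases hk : 0 ≤ k
    · rw [buildB, dif_pos hk]
      have h4 : PySem.Int.floordiv n 4 = n / 4 :=
        PySem.Int.floordiv_eq_ediv_of_pos (by norm_num)
      rw [h4] at h2 hlen
      have hstep : stepB n width k f = solution (n - 4 * k) (width - k) := by
        apply step_eq
        intro c hc hr
        have hj : ((c - 1).toNat : Int) = c - 1 := Int.toNat_of_nonneg (by omega)
        have hjlt : (c - 1).toNat < f.length := by omega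
        have := hf (c - 1).toNat hjlt
        rw [hj] at this
        rw [this]
        congr 1 <;> omega
      have hent' : ∀ j : Nat, j < (stepB n width k f :: f).length →
          (PySem.List.pyGet? (stepB n width k f :: f) (j : Int)).getD 0 =
            solution (n - 4 * (((k - 1) + 1) + j)) (width - (((k - 1) + 1) + j)) := by
        intro j hj
        cases j with
        | zero =>
          simp only [Nat.cast_zero, PySem.List.pyGet?_zero_cons, Option.getD_some]
          rw [hstep]
          congr 1 <;> omega
        | succ j =>
          have hc : ((j + 1 : Nat) : Int) = (j : Int) + 1 := by push_cast; ring
          rw [hc, PySem.List.pyGet?_cons_succ]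
          have := hf j (by simpa using hj)
          rw [this]
          congr 1 <;> omega
      obtain ⟨ihlen, ihent⟩ := ih n width (k - 1) (stepB n width k f :: f)
        (by omega) (by omega) (by rw [h4]; omega)
        (by simp only [List.length_cons]; rw [h4]; push_cast; omega)
        hent'
      refine ⟨?_, ihent⟩
      rw [ihlen]
      simp only [List.length_cons]
      omega
    · have hk1 : k = -1 := by omega
      rw [buildB, dif_neg (by omega)]
      subst hk1
      refine ⟨by simp, fun j hj => ?_⟩
      have := hf j hj
      have he : (-1 + 1 + (j : Int)) = (j : Int) := by omega
      rw [he] at this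
      exact this

-- ===== VERDICT (by name: the statement is the Claim_ definition above) =====
theorem solution_spec : Claim_equal_solution := by
  intro n width _
  unfold Spec_solution
  by_cases h1 : n < 4
  · rw [solution, if_pos h1, solution_alt, if_pos h1]
  by_cases h2 : n = 4
  · rw [solution, if_neg h1, if_pos h2, solution_alt, if_neg h1, if_pos h2]
  · rw [solution_alt, if_neg h1, if_neg h2]
    have h4 : PySem.Int.floordiv n 4 = n / 4 :=
      PySem.Int.floordiv_eq_ediv_of_pos (by norm_num)
    obtain ⟨hlen, hent⟩ := build_inv (PySem.Int.floordiv n 4 + 1).toNat n width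
      (PySem.Int.floordiv n 4) [] le_rfl (by rw [h4]; omega) le_rfl (by simp)
      (by intro j hj; simp at hj)
    have h0 : 0 < (buildB n width (PySem.Int.floordiv n 4) []).length := by
      rw [hlen, h4]; simp; omega
    have := hent 0 h0
    simp only [Nat.cast_zero, mul_zero, sub_zero] at this
    rw [this]
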